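-- pv_equiv track=rewrite | github.com/netman-su/netrun-app | netrun/utils/configurations/config_diff.py | _child_lookup
-- ===== SOURCE A (Python) =====
-- from collections import namedtuple
--
-- def _child_lookup(baseline_parent, baseline_children, comparison_children):
--     ChildComparison = namedtuple('ChildComparison', 'additional missing')
--     missing = []
--     for baseline_child in baseline_children:
--         if baseline_child not in comparison_children and not missing:
--             missing.append(baseline_parent)
--             missing.append(baseline_child)
--         elif baseline_child not in comparison_children:
--             missing.append(baseline_child)
--         elif baseline_child in comparison_children:
--             comparison_children.remove(baseline_child)
--     if comparison_children:
--         additional = [baseline_parent] + comparison_children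
--     else:
--         additional = []
--     return ChildComparison(additional, missing)
-- ===== SOURCE B (Python) =====
-- from collections import namedtuple, Counter
--
-- def _child_lookup(baseline_parent, baseline_children, comparison_children):
--     ChildComparison = namedtuple('ChildComparison', 'additional missing')
--     avail = Counter(comparison_children)
--     removed = Counter()
--     missing_children = []
--     for child in baseline_children:
--         if avail[child] > 0:
--             avail[child] -= 1
--             removed[child] += 1
--         else:
--             missing_children.append(child)
--     leftovers = []
--     for child in comparison_children:
--         if removed[child] > 0:
--             removed[child] -= 1
--         else:
--             leftovers.append(child)
--     comparison_children[:] = leftovers  # same in-place mutation as the original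
--     missing = [baseline_parent] + missing_children if missing_children else []
--     additional = [baseline_parent] + leftovers if leftovers else []
--     return ChildComparison(additional, missing)
-- ===== Notes on version B (the rewrite author's own statement) =====
-- stated objective: simpler
-- what changed: Replaces A's single loop that repeatedly membership-tests and remove()s from the live comparison list with a Counter-based multiset difference: one availability pass over baseline_children (decrement-or-missing) and one skip pass over comparison_children that drops the removed occurrences.
import Mathlib
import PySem

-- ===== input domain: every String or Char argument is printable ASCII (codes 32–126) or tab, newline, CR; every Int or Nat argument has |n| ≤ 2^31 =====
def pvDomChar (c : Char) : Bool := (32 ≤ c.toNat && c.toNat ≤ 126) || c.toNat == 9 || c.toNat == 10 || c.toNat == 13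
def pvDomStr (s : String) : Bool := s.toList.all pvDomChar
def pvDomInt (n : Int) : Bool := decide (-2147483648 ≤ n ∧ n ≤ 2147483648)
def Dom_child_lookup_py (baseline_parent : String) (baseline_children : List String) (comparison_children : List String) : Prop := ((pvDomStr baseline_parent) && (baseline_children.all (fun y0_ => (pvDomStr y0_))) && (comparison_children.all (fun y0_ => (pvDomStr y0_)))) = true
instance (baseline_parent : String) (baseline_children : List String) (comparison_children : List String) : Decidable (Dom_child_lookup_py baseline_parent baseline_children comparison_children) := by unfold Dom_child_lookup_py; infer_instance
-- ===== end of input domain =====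

-- B replaces A's mutate-the-list-inside-the-loop scan with a Counter-based multiset
-- difference (one availability pass over baseline, one skip pass over comparison): simpler
-- shape, no repeated 'in'/remove scans.  A mutates comparison_children in place; B performs
-- the same mutation in Python; the Lean equivalence is about the RETURN value only.

-- ===== PORT A =====
-- the loop over baseline_children; state = (missing, comparison_children)
def childLoopA (baseline_parent : String) : List String → List String → List String → List String × List String
  | [], missing, comp => (missing, comp)
  | c :: rest, missing, comp =>
    if !comp.contains c && missing.isEmpty then
      childLoopA baseline_parent rest (missing ++ [baseline_parent, c]) comp
    else if !comp.contains c then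
      childLoopA baseline_parent rest (missing ++ [c]) comp
    else
      -- list.remove: exact here, the branch guarantees c ∈ comp so remove? is some
      childLoopA baseline_parent rest missing ((PySem.List.remove? comp c).getD comp)

def child_lookup_py (baseline_parent : String) (baseline_children : List String) (comparison_children : List String) : List String × List String :=
  let r := childLoopA baseline_parent baseline_children [] comparison_children
  let additional := if r.2.isEmpty then [] else baseline_parent :: r.2
  (additional, r.1)

-- ===== PORT B =====
-- first pass: state = (avail, removed, missing_children)
def childAvailLoop : List String → PySem.Dict String Int → PySem.Dict String Int → List String → PySem.Dict String Int × PySem.Dict String Int × List String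
  | [], avail, removed, mc => (avail, removed, mc)
  | c :: rest, avail, removed, mc =>
    if avail.getD c 0 > 0 then
      childAvailLoop rest (avail.insert c (avail.getD c 0 - 1)) (removed.insert c (removed.getD c 0 + 1)) mc
    else
      childAvailLoop rest avail removed (mc ++ [c])

-- second pass: keep an occurrence unless its remaining removed-count is positive
def childLeftovers : List String → PySem.Dict String Int → List String
  | [], _ => []
  | c :: rest, skip =>
    if skip.getD c 0 > 0 then childLeftovers rest (skip.insert c (skip.getD c 0 - 1))
    else c :: childLeftovers rest skip

def child_lookup_py_alt (baseline_parent : String) (baseline_children : List String) (comparison_children : List String) : List String × List String :=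
  let avail := PySem.Dict.counter comparison_children
  let r := childAvailLoop baseline_children avail PySem.Dict.empty []
  let leftovers := childLeftovers comparison_children r.2.1
  let missing := if r.2.2.isEmpty then [] else baseline_parent :: r.2.2
  let additional := if leftovers.isEmpty then [] else baseline_parent :: leftovers
  (additional, missing)

-- ===== PRECONDITION & SPEC =====
def Spec_child_lookup_py (baseline_parent : String) (baseline_children : List String) (comparison_children : List String) (out : List String × List String) : Prop := out = child_lookup_py_alt baseline_parent baseline_children comparison_children
instance (baseline_parent : String) (baseline_children : List String) (comparison_children : List String) (out : List String × List String) : Decidable (Spec_child_lookup_py baseline_parent baseline_children comparison_children out) := by unfold Spec_child_lookup_py; infer_instance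

-- ===== CLAIM (what is proved, stated in full; the proofs are below) =====
def Claim_equal_child_lookup_py : Prop := ∀ (baseline_parent : String) (baseline_children : List String) (comparison_children : List String), Dom_child_lookup_py baseline_parent baseline_children comparison_children → Spec_child_lookup_py baseline_parent baseline_children comparison_children (child_lookup_py baseline_parent baseline_children comparison_children)

-- ===== LEMMAS AND PROOFS =====

-- childLeftovers only looks at the dict through getD
theorem childLeftovers_congr (xs : List String) :
    ∀ (d1 d2 : PySem.Dict String Int), (∀ k, d1.getD k 0 = d2.getD k 0) →
    childLeftovers xs d1 = childLeftovers xs d2 := by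
  induction xs with
  | nil => intro d1 d2 _; rfl
  | cons x rest ih =>
    intro d1 d2 h
    simp only [childLeftovers, h x]
    split
    · exact ih _ _ (by intro k; simp [PySem.Dict.getD_insert, h])
    · rw [ih _ _ h]

theorem childLeftovers_nonpos (xs : List String) :
    ∀ (d : PySem.Dict String Int), (∀ k, d.getD k 0 ≤ 0) →
    childLeftovers xs d = xs := by
  induction xs with
  | nil => intro d _; rfl
  | cons x rest ih =>
    intro d h
    simp only [childLeftovers]
    rw [if_neg (by have := h x; omega), ih _ h]

-- bumping the skip count of c removes the first kept occurrence of c from the output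
theorem childLeftovers_bump (c : String) (xs : List String) :
    ∀ (d : PySem.Dict String Int), (∀ k, 0 ≤ d.getD k 0) →
    c ∈ childLeftovers xs d →
    childLeftovers xs (d.insert c (d.getD c 0 + 1)) = (childLeftovers xs d).erase c := by
  induction xs with
  | nil => intro d _ hm; simp [childLeftovers] at hm
  | cons x rest ih =>
    intro d hnn hm
    have hL : childLeftovers (x :: rest) (d.insert c (d.getD c 0 + 1))
        = if (d.insert c (d.getD c 0 + 1)).getD x 0 > 0
          then childLeftovers rest ((d.insert c (d.getD c 0 + 1)).insert x ((d.insert c (d.getD c 0 + 1)).getD x 0 - 1))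
          else x :: childLeftovers rest (d.insert c (d.getD c 0 + 1)) := rfl
    by_cases hxc : x = c
    · subst hxc
      rw [hL]
      simp only [PySem.Dict.getD_insert_self]
      rw [if_pos (by have := hnn x; omega)]
      by_cases hpos : d.getD x 0 > 0
      · -- this occurrence is skipped by both passes
        have hRHS : childLeftovers (x :: rest) d = childLeftovers rest (d.insert x (d.getD x 0 - 1)) := by
          simp only [childLeftovers, if_pos hpos]
        have hm' : x ∈ childLeftovers rest (d.insert x (d.getD x 0 - 1)) := hRHS ▸ hm
        have hnn' : ∀ k, 0 ≤ (d.insert x (d.getD x 0 - 1)).getD k 0 := by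
          intro k; rw [PySem.Dict.getD_insert]; split
          · omega
          · exact hnn k
        have e1 : childLeftovers rest ((d.insert x (d.getD x 0 + 1)).insert x (d.getD x 0 + 1 - 1))
            = childLeftovers rest ((d.insert x (d.getD x 0 - 1)).insert x ((d.insert x (d.getD x 0 - 1)).getD x 0 + 1)) := by
          apply childLeftovers_congr
          intro k
          by_cases hk : k = x
          · subst hk; simp
          · simp [PySem.Dict.getD_insert, hk]
        rw [e1, ih _ hnn' hm', hRHS]
      · -- remaining skip count is 0: the bump skips exactly this occurrence
        have h0 : d.getD x 0 = 0 := le_antisymm (by omega) (hnn x)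
        have hRHS : childLeftovers (x :: rest) d = x :: childLeftovers rest d := by
          simp only [childLeftovers, if_neg hpos]
        have e1 : childLeftovers rest ((d.insert x (d.getD x 0 + 1)).insert x (d.getD x 0 + 1 - 1))
            = childLeftovers rest d := by
          apply childLeftovers_congr
          intro k
          by_cases hk : k = x
          · subst hk; simp
          · simp [PySem.Dict.getD_insert, hk]
        rw [e1, hRHS, List.erase_cons_head]
    · -- x ≠ c: the head is treated identically by both passes
      have hgx : (d.insert c (d.getD c 0 + 1)).getD x 0 = d.getD x 0 := by
        rw [PySem.Dict.getD_insert, if_neg hxc]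
      rw [hL, hgx]
      by_cases hpos : d.getD x 0 > 0
      · have hRHS : childLeftovers (x :: rest) d = childLeftovers rest (d.insert x (d.getD x 0 - 1)) := by
          simp only [childLeftovers, if_pos hpos]
        have hm' : c ∈ childLeftovers rest (d.insert x (d.getD x 0 - 1)) := hRHS ▸ hm
        have hnn' : ∀ k, 0 ≤ (d.insert x (d.getD x 0 - 1)).getD k 0 := by
          intro k; rw [PySem.Dict.getD_insert]; split
          · omega
          · exact hnn k
        have e1 : childLeftovers rest ((d.insert c (d.getD c 0 + 1)).insert x (d.getD x 0 - 1))
            = childLeftovers rest ((d.insert x (d.getD x 0 - 1)).insert c ((d.insert x (d.getD x 0 - 1)).getD c 0 + 1)) := by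
          apply childLeftovers_congr
          intro k
          by_cases hk : k = x
          · subst hk; simp [PySem.Dict.getD_insert, hxc]
          · by_cases hkc : k = c
            · subst hkc; simp [PySem.Dict.getD_insert, hk]
            · simp [PySem.Dict.getD_insert, hk, hkc]
        rw [if_pos hpos, e1, ih _ hnn' hm', hRHS]
      · have hRHS : childLeftovers (x :: rest) d = x :: childLeftovers rest d := by
          simp only [childLeftovers, if_neg hpos]
        have hm' : c ∈ childLeftovers rest d := by
          rcases List.mem_cons.mp (hRHS ▸ hm) with h | h
          · exact absurd h.symm hxc
          · exact h
        rw [if_neg hpos, ih _ hnn hm', hRHS]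
        rw [List.erase_cons_tail (by simp [hxc])]

-- main invariant lemma: A's loop and B's first pass stay in lockstep
theorem child_main (parent : String) (orig : List String) (bc : List String) :
    ∀ (missing comp mc : List String) (avail removed : PySem.Dict String Int),
    (∀ v, avail.getD v 0 = (comp.count v : Int)) →
    childLeftovers orig removed = comp →
    (∀ k, 0 ≤ removed.getD k 0) →
    missing = (if mc.isEmpty then [] else parent :: mc) →
    childLoopA parent bc missing comp =
      ((if (childAvailLoop bc avail removed mc).2.2.isEmpty then [] else parent :: (childAvailLoop bc avail removed mc).2.2),
       childLeftovers orig (childAvailLoop bc avail removed mc).2.1) := by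
  induction bc with
  | nil =>
    intro missing comp mc avail removed h1 h2 _ h4
    simp [childLoopA, childAvailLoop, h2, h4]
  | cons c rest ih =>
    intro missing comp mc avail removed h1 h2 h3 h4
    by_cases hpos : avail.getD c 0 > 0
    · -- c found in comp: A removes its first occurrence, B decrements avail / bumps removed
      have hcnt : 0 < comp.count c := by have := h1 c; omega
      have hmem : c ∈ comp := List.count_pos_iff.mp hcnt
      have hrem : (PySem.List.remove? comp c).getD comp = comp.erase c := by
        rw [PySem.List.remove?_eq_some_erase comp c hmem, Option.getD_some]
      have hA : childLoopA parent (c :: rest) missing comp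
          = childLoopA parent rest missing (comp.erase c) := by
        simp [childLoopA, hrem, hmem]
      have hB : childAvailLoop (c :: rest) avail removed mc
          = childAvailLoop rest (avail.insert c (avail.getD c 0 - 1)) (removed.insert c (removed.getD c 0 + 1)) mc := by
        simp [childAvailLoop, hpos]
      rw [hA, hB]
      apply ih
      · intro v
        by_cases hvc : v = c
        · subst hvc
          rw [PySem.Dict.getD_insert_self, h1 v, List.count_erase_self]
          omega
        · rw [PySem.Dict.getD_insert, if_neg hvc, h1 v, List.count_erase_of_ne hvc]
      · rw [childLeftovers_bump c orig removed h3 (h2 ▸ hmem), h2]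
      · intro k; rw [PySem.Dict.getD_insert]; split
        · have := h3 c; omega
        · exact h3 k
      · exact h4
    · -- c not in comp: A appends to missing, B appends to missing_children
      have hcnt : comp.count c = 0 := by have := h1 c; omega
      have hnmem : c ∉ comp := by
        intro h
        have := List.count_pos_iff.mpr h
        omega
      have hB : childAvailLoop (c :: rest) avail removed mc
          = childAvailLoop rest avail removed (mc ++ [c]) := by
        simp [childAvailLoop, hpos]
      rw [hB]
      by_cases hmc : mc.isEmpty
      · have hmcnil : mc = [] := by simpa using hmc
        have hmiss : missing = [] := by rw [h4, if_pos hmc]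
        have hA : childLoopA parent (c :: rest) missing comp
            = childLoopA parent rest [parent, c] comp := by
          simp [childLoopA, hnmem, hmiss]
        rw [hA]
        apply ih _ _ _ _ _ h1 h2 h3
        simp [hmcnil]
      · have hmiss : missing = parent :: mc := by rw [h4, if_neg hmc]
        have hne : missing.isEmpty = false := by simp [hmiss]
        have hA : childLoopA parent (c :: rest) missing comp
            = childLoopA parent rest (missing ++ [c]) comp := by
          simp [childLoopA, hnmem, hne]
        rw [hA, hmiss]
        have he : (parent :: mc) ++ [c] = parent :: (mc ++ [c]) := by simp
        rw [he]
        apply ih _ _ _ _ _ h1 h2 h3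
        simp

-- ===== VERDICT (by name: the statement is the Claim_ definition above) =====
theorem child_lookup_py_spec : Claim_equal_child_lookup_py := by
  intro parent bc cc _
  unfold Spec_child_lookup_py child_lookup_py child_lookup_py_alt
  rw [child_main parent cc bc [] cc [] (PySem.Dict.counter cc) PySem.Dict.empty
    (by intro v; simp [PySem.Dict.getD_counter])
    (childLeftovers_nonpos cc _ (by intro k; simp [PySem.Dict.getD_empty]))
    (by intro k; simp [PySem.Dict.getD_empty])
    (by simp)]
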